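-- pv_equiv track=rewrite | github.com/srihariprasad-r/leet-code | P2274.Max_consective_floors_without_special_floors.py | maxConsecutive
-- ===== SOURCE A (Python) =====
-- def maxConsecutive(bottom, top, special):
--     """
--     :type bottom: int
--     :type top: int
--     :type special: List[int]
--     :rtype: int
--     """
--     st = bottom
--     end = top
--     ans = 0
--
--     for i in range(len(special)):
--         diff = special[i] - st
--         ans = max(ans, diff)
--         st = special[i]+1
--
--     ans = max(ans, end - special[-1])
--
--     return ans
-- ===== SOURCE B (Python) =====
-- def maxConsecutive(bottom, top, special):
--     # Divide and conquer: solve(lo, hi) returns (max inner gap, first, last)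
--     # of special[lo:hi]; halves are merged by also counting the gap that
--     # straddles the split point.
--     def solve(lo, hi):
--         if hi - lo == 1:
--             return (0, special[lo], special[lo])
--         mid = (lo + hi) // 2
--         g1, f1, l1 = solve(lo, mid)
--         g2, f2, l2 = solve(mid, hi)
--         return (max(g1, g2, f2 - l1 - 1), f1, l2)
--     if not special:
--         return max(0, top - bottom + 1)
--     g, f, l = solve(0, len(special))
--     return max(0, f - bottom, g, top - l)
-- ===== Notes on version B (the rewrite author's own statement) =====
-- stated objective: alternative
-- what changed: Replaces A's single left-to-right pass with a running start pointer by a divide-and-conquer recursion that splits special at its midpoint and merges (max inner gap, first, last) triples, adding the boundary gaps to bottom and top only at the end.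
-- outside the precondition, e.g. on maxConsecutive(0, 5, []): A raises IndexError, B returns 6
-- crash fix: On empty special A raises IndexError (it evaluates special[-1]); B returns max(0, top-bottom+1), the whole untouched range. — e.g. on maxConsecutive(0, 5, []): A raises IndexError, B returns 6
import Mathlib
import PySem

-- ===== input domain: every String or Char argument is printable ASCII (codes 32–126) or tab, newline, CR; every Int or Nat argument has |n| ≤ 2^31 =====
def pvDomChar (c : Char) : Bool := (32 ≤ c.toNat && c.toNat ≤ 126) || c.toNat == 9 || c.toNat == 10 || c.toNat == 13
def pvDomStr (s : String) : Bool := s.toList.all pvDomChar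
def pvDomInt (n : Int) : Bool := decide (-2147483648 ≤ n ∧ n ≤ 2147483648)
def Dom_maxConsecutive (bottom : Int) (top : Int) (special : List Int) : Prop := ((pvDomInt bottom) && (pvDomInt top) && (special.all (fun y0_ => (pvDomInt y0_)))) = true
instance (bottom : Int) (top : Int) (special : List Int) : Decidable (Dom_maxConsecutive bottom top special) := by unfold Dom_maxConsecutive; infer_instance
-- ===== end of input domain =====

-- B replaces A's left-to-right scan with a divide-and-conquer recursion merging
-- (max inner gap, first, last) triples of the two halves (alternative, same cost).

-- ===== PORT A =====
def maxConsecutive (bottom : Int) (top : Int) (special : List Int) : Int :=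
  -- st = bottom; ans = 0; for i in range(len(special)): ... ; ans = max(ans, top - special[-1])
  -- special[i] (always in range here) and special[-1] (raises on [], excluded by Pre_) via pyGetD
  max ((PySem.List.pyRange 0 special.length 1).foldl
        (fun (p : Int × Int) i =>
          (PySem.List.pyGetD special i 0 + 1, max p.2 (PySem.List.pyGetD special i 0 - p.1)))
        (bottom, 0)).2
      (top - PySem.List.pyGetD special (-1) 0)

-- ===== PORT B =====
-- solve(lo, hi) of Source B, transliterated on the nonempty slice special[lo:hi] itself:
-- split at mid = len // 2 and merge the halves' (max inner gap, first, last) triples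
def pvSolve (xs : List Int) : Int × Int × Int :=
  match xs with
  | [] => (0, 0, 0)             -- unreachable: solve is only called on nonempty slices
  | [x] => (0, x, x)
  | a :: b :: t =>
    let mid := (a :: b :: t).length / 2
    let p1 := pvSolve ((a :: b :: t).take mid)
    let p2 := pvSolve ((a :: b :: t).drop mid)
    (max (max p1.1 p2.1) (p2.2.1 - p1.2.2 - 1), p1.2.1, p2.2.2)
termination_by xs.length
decreasing_by
  · simp only [List.length_take, List.length_cons]; omega
  · simp only [List.length_drop, List.length_cons]; omega

def maxConsecutive_alt (bottom : Int) (top : Int) (special : List Int) : Int :=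
  match special with
  | [] => max 0 (top - bottom + 1)
  | _ =>
    let p := pvSolve special
    max (max (max 0 (p.2.1 - bottom)) p.1) (top - p.2.2)

-- ===== PRECONDITION & SPEC =====
-- Pre_ excludes only the empty special list, on which A raises IndexError at special[-1].
def Pre_maxConsecutive (bottom : Int) (top : Int) (special : List Int) : Prop := special ≠ []
instance (bottom : Int) (top : Int) (special : List Int) : Decidable (Pre_maxConsecutive bottom top special) := by unfold Pre_maxConsecutive; infer_instance
def pvWitness_maxConsecutive : Int × Int × List Int := (3, 10, [4, 6])

-- On empty special A raises IndexError (it evaluates special[-1]); B returns max(0, top-bottom+1), the whole untouched range.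
def Raises_maxConsecutive (bottom : Int) (top : Int) (special : List Int) : Prop := special = []
instance (bottom : Int) (top : Int) (special : List Int) : Decidable (Raises_maxConsecutive bottom top special) := by unfold Raises_maxConsecutive; infer_instance
def pvRaiseWitness_maxConsecutive : Int × Int × List Int := (0, 5, [])
def pvRaiseWitnessOut_maxConsecutive : Int := 6

def Spec_maxConsecutive (bottom : Int) (top : Int) (special : List Int) (out : Int) : Prop := out = maxConsecutive_alt bottom top special
instance (bottom : Int) (top : Int) (special : List Int) (out : Int) : Decidable (Spec_maxConsecutive bottom top special out) := by unfold Spec_maxConsecutive; infer_instance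

-- ===== CLAIM (what is proved, stated in full; the proofs are below) =====
def Claim_equal_maxConsecutive : Prop := ∀ (bottom : Int) (top : Int) (special : List Int), Dom_maxConsecutive bottom top special → Pre_maxConsecutive bottom top special → Spec_maxConsecutive bottom top special (maxConsecutive bottom top special)
def Claim_raises_maxConsecutive : Prop := (∀ (bottom : Int) (top : Int) (special : List Int), Dom_maxConsecutive bottom top special → Raises_maxConsecutive bottom top special → ¬ Pre_maxConsecutive bottom top special) ∧ (Dom_maxConsecutive (pvRaiseWitness_maxConsecutive.1) (pvRaiseWitness_maxConsecutive.2.1) (pvRaiseWitness_maxConsecutive.2.2) ∧ Raises_maxConsecutive (pvRaiseWitness_maxConsecutive.1) (pvRaiseWitness_maxConsecutive.2.1) (pvRaiseWitness_maxConsecutive.2.2) ∧ maxConsecutive_alt (pvRaiseWitness_maxConsecutive.1) (pvRaiseWitness_maxConsecutive.2.1) (pvRaiseWitness_maxConsecutive.2.2) = pvRaiseWitnessOut_maxConsecutive)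

-- ===== LEMMAS AND PROOFS =====

-- the list of gaps between consecutive elements, and its maximum with 0
def pvGaps (xs : List Int) : List Int := (xs.zip xs.tail).map (fun p => p.2 - p.1 - 1)
def pvG (xs : List Int) : Int := (pvGaps xs).foldl max 0

-- getLast! over cons-cons and over append
theorem pv_gl_cc (a b : Int) (l : List Int) : (a :: b :: l).getLast! = (b :: l).getLast! := by
  simp

theorem pv_gl_app (l1 : List Int) : ∀ (b : Int) (r : List Int), (l1 ++ b :: r).getLast! = (b :: r).getLast! := by
  induction l1 with
  | nil => intro b r; simp
  | cons a t ih =>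
      intro b r
      cases t with
      | nil => simp
      | cons c u =>
          simp only [List.cons_append]
          rw [pv_gl_cc]
          simpa using ih b r

-- foldl max distributes over max in the accumulator
theorem pv_foldl_max_max (l : List Int) : ∀ (c d : Int), l.foldl max (max c d) = max c (l.foldl max d) := by
  induction l with
  | nil => intro c d; simp
  | cons z t ih =>
      intro c d
      simp only [List.foldl_cons, max_assoc]
      exact ih c (max d z)

-- the accumulator only grows
theorem pv_le_foldl_max (l : List Int) : ∀ c : Int, c ≤ l.foldl max c := by
  induction l with
  | nil => intro c; simp
  | cons z t ih =>
      intro c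
      exact le_trans (le_max_left c z) (ih (max c z))

theorem pvG_nonneg (xs : List Int) : 0 ≤ pvG xs := pv_le_foldl_max _ 0

-- pulling the 0 out of a foldl max
theorem pv_max0_foldl (l : List Int) (c : Int) :
    max 0 (l.foldl max c) = max c (l.foldl max 0) := by
  have h1 := pv_foldl_max_max l 0 c
  have h2 := pv_foldl_max_max l c 0
  rw [max_comm (0 : Int) c] at h1
  rw [h2] at h1
  exact h1.symm

theorem pv_fold3 (l1 l2 : List Int) (x : Int) :
    (l1 ++ x :: l2).foldl max 0 = max (max (l1.foldl max 0) (l2.foldl max 0)) x := by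
  have h0 : (0 : Int) ≤ l1.foldl max 0 := pv_le_foldl_max _ 0
  calc (l1 ++ x :: l2).foldl max 0
      = l2.foldl max (max (l1.foldl max 0) x) := by
        rw [List.foldl_append, List.foldl_cons]
    _ = max (l1.foldl max 0) (l2.foldl max x) := pv_foldl_max_max l2 _ x
    _ = max (max (l1.foldl max 0) 0) (l2.foldl max x) := by rw [max_eq_left h0]
    _ = max (l1.foldl max 0) (max 0 (l2.foldl max x)) := by rw [max_assoc]
    _ = max (l1.foldl max 0) (max x (l2.foldl max 0)) := by rw [pv_max0_foldl]
    _ = max (max (l1.foldl max 0) (l2.foldl max 0)) x := by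
        simp [max_comm, max_left_comm]

-- consecutive pairs of an append split into the two sides plus the straddling pair
theorem pv_zip_tail_append (lt : List Int) : ∀ (la ra : Int) (rt : List Int),
    ((la :: lt) ++ ra :: rt).zip (((la :: lt) ++ ra :: rt).tail) =
      ((la :: lt).zip lt) ++ ((la :: lt).getLast!, ra) :: ((ra :: rt).zip rt) := by
  induction lt with
  | nil => intro la ra rt; simp
  | cons c ct ih =>
      intro la ra rt
      simp only [List.cons_append, List.tail_cons, List.zip_cons_cons]
      rw [pv_gl_cc]
      have := ih c ra rt
      simp only [List.cons_append, List.tail_cons] at this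
      rw [this]

-- pvG merges across an append the way pvSolve's combine step does
theorem pv_G_append (lt : List Int) (la ra : Int) (rt : List Int) :
    pvG ((la :: lt) ++ ra :: rt) =
      max (max (pvG (la :: lt)) (pvG (ra :: rt))) (ra - (la :: lt).getLast! - 1) := by
  unfold pvG pvGaps
  rw [pv_zip_tail_append]
  rw [List.map_append, List.map_cons]
  exact pv_fold3 _ _ _

-- pvSolve computes (max inner gap, first, last)
theorem pvSolve_eq (n : Nat) : ∀ (xs : List Int), xs ≠ [] → xs.length ≤ n →
    pvSolve xs = (pvG xs, xs.head!, xs.getLast!) := by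
  induction n with
  | zero => intro xs hne hlen; cases xs with
      | nil => exact absurd rfl hne
      | cons a t => simp at hlen
  | succ n ih =>
      intro xs hne hlen
      match xs with
      | [x] => simp [pvSolve, pvG, pvGaps]
      | a :: b :: t =>
        rw [pvSolve]
        have hlen2 : (a :: b :: t).length = t.length + 2 := by simp
        set mid := (a :: b :: t).length / 2 with hmid
        have hmid1 : 1 ≤ mid := by rw [hmid, hlen2]; omega
        have hmidlt : mid < (a :: b :: t).length := by rw [hmid, hlen2]; omega
        set L := (a :: b :: t).take mid with hL
        set R := (a :: b :: t).drop mid with hR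
        have hLlen : L.length = mid := by rw [hL]; simp; omega
        have hRlen : R.length = (a :: b :: t).length - mid := by rw [hR]; simp
        have hLne : L ≠ [] := by
          intro h; rw [h] at hLlen; simp at hLlen; omega
        have hRne : R ≠ [] := by
          intro h; rw [h] at hRlen; simp at hRlen; omega
        have hLR : L ++ R = a :: b :: t := List.take_append_drop mid _
        have h1 := ih L hLne (by omega)
        have h2 := ih R hRne (by rw [hRlen, hlen2]; omega)
        rw [h1, h2]
        obtain ⟨la, lt, hla⟩ := List.exists_cons_of_ne_nil hLne
        obtain ⟨ra, rt, hra⟩ := List.exists_cons_of_ne_nil hRne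
        have hG : pvG (a :: b :: t) =
            max (max (pvG (la :: lt)) (pvG (ra :: rt))) (ra - (la :: lt).getLast! - 1) := by
          rw [← hLR, hla, hra]; exact pv_G_append lt la ra rt
        have hhead : (a :: b :: t).head! = la := by
          rw [← hLR, hla]; simp
        have hlast : (a :: b :: t).getLast! = (ra :: rt).getLast! := by
          rw [← hLR, hla, hra]
          simpa using pv_gl_app (la :: lt) ra rt
        rw [hla, hra]
        simp only [hG, hhead, hlast]
        simp

-- the core invariant for A's loop (running-start fold + final max = gap-list fold)
theorem pv_key (xs : List Int) : ∀ (x st a top : Int),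
    max ((x :: xs).foldl (fun (p : Int × Int) v => (v + 1, max p.2 (v - p.1))) (st, a)).2
        (top - (x :: xs).getLast (by simp)) =
    max a ((((x :: xs).zip (xs ++ [top + 1])).map (fun p => p.2 - p.1 - 1)).foldl max (x - st)) := by
  induction xs with
  | nil =>
      intro x st a top
      simp [max_assoc, show top + 1 - x - 1 = top - x from by ring]
  | cons y ys ih =>
      intro x st a top
      have hlast : (x :: y :: ys).getLast (by simp) = (y :: ys).getLast (by simp) := by
        simp [List.getLast]
      rw [List.foldl_cons, hlast]
      rw [ih y (x + 1) (max a (x - st)) top]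
      have hz : (x :: y :: ys).zip ((y :: ys) ++ [top + 1]) =
          (x, y) :: (y :: ys).zip (ys ++ [top + 1]) := by
        simp
      rw [hz]
      simp only [List.map_cons, List.foldl_cons]
      have h1 : y - (x + 1) = y - x - 1 := by ring
      rw [h1, max_assoc, ← pv_foldl_max_max]

-- the zip against the tail with the sentinel appended splits off a last pair
theorem pv_zip_sentinel (xs : List Int) : ∀ (x t : Int),
    (x :: xs).zip (xs ++ [t]) = ((x :: xs).zip xs) ++ [((x :: xs).getLast!, t)] := by
  induction xs with
  | nil => intro x t; simp
  | cons y ys ih =>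
      intro x t
      simp only [List.cons_append, List.zip_cons_cons]
      rw [pv_gl_cc, ih y t]

-- ===== VERDICT (by name: the statement is the Claim_ definition above) =====
theorem maxConsecutive_spec : Claim_equal_maxConsecutive := by
  unfold Claim_equal_maxConsecutive
  intro bottom top special _ hpre
  unfold Spec_maxConsecutive maxConsecutive maxConsecutive_alt Pre_maxConsecutive at *
  obtain ⟨x, xs, rfl⟩ := List.exists_cons_of_ne_nil hpre
  -- A side: index loop over the list, then the zip-with-sentinel form
  rw [PySem.List.foldl_pyRange_zero_pyGetD' (x :: xs) 0
        (fun (p : Int × Int) v => (v + 1, max p.2 (v - p.1))) (bottom, 0)]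
  rw [PySem.List.pyGetD_neg_one (x :: xs) 0 (by simp)]
  rw [pv_key xs x bottom 0 top]
  rw [pv_zip_sentinel xs x (top + 1), List.map_append, List.map_cons, List.map_nil]
  have e1 : top + 1 - (x :: xs).getLast! - 1 = top - (x :: xs).getLast! := by ring
  rw [e1, List.foldl_append, List.foldl_cons, List.foldl_nil]
  -- now fold the accumulator algebra into B's shape
  rw [← max_assoc]
  rw [pv_max0_foldl]
  -- B side
  rw [pvSolve_eq (x :: xs).length (x :: xs) (by simp) (le_refl _)]
  have hG := pvG_nonneg (x :: xs)
  have hB : max (max 0 ((x :: xs).head! - bottom)) (pvG (x :: xs)) =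
      max ((x :: xs).head! - bottom) (pvG (x :: xs)) := by
    rw [max_assoc]
    rw [max_eq_right (le_trans hG (le_max_right _ _))]
  simp only [List.head!]
  simp only [List.head!] at hB
  rw [hB]
  rfl

theorem maxConsecutive_raises : Claim_raises_maxConsecutive := by
  unfold Claim_raises_maxConsecutive
  exact ⟨fun _ _ _ _ h hp => hp h, by decide⟩

-- the raise-witness facts extracted from maxConsecutive_raises (keeps the claim's use explicit)
theorem pvRaiseWitness_maxConsecutive_ok :
    Raises_maxConsecutive 0 5 [] ∧ maxConsecutive_alt 0 5 [] = 6 :=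
  ⟨maxConsecutive_raises.2.2.1, maxConsecutive_raises.2.2.2⟩
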